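-- pv_equiv track=rewrite | github.com/KarolWojtachnia/CodeAdvent | 2023/d3.py | find_number_indices
-- ===== SOURCE A (Python) =====
-- def get_number_len(line_index: int, char_index: int, lines: list) -> int:
--     number_len = 1
--     while True:
--         if (
--             char_index < len(lines[0]) - 2
--             and lines[line_index][char_index + 1].isnumeric()
--         ):
--             char_index += 1
--             number_len += 1
--         else:
--             break
--     return number_len
--
-- def find_number_indices(lines: list) -> tuple:
--     found_numbers = []
--     found_stars = []
--     for i in range(len(lines)):
--         for j in range(len(lines[0]) - 1):
--             if lines[i][j] == "*":
--                 found_stars.append([i, j])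
--             elif j == 0 and lines[i][j].isnumeric():
--                 found_numbers.append([i, j, get_number_len(i, j, lines)])
--             elif j == 0:
--                 continue
--             elif lines[i][j].isnumeric() and not lines[i][j - 1].isnumeric():
--                 found_numbers.append([i, j, get_number_len(i, j, lines)])
--     return found_numbers, found_stars
-- ===== SOURCE B (Python) =====
-- import re
--
-- def find_number_indices(lines: list) -> tuple:
--     found_numbers = []
--     found_stars = []
--     if not lines:
--         return found_numbers, found_stars
--     width = max(len(lines[0]) - 1, 0)
--     for i, row in enumerate(lines):
--         seg = row[:width]
--         for m in re.finditer(r'[0-9]+', seg):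
--             found_numbers.append([i, m.start(), len(m.group())])
--         for j, ch in enumerate(seg):
--             if ch == '*':
--                 found_stars.append([i, j])
--     return found_numbers, found_stars
-- ===== Notes on version B (the rewrite author's own statement) =====
-- stated objective: idiomatic
-- what changed: Replaces the per-index branch chain with a lookahead length helper by a per-row slice row[:W-1] scanned once with re.finditer for digit runs (start+length in one step) and a simple comprehension-style scan for stars.
import Mathlib
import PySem

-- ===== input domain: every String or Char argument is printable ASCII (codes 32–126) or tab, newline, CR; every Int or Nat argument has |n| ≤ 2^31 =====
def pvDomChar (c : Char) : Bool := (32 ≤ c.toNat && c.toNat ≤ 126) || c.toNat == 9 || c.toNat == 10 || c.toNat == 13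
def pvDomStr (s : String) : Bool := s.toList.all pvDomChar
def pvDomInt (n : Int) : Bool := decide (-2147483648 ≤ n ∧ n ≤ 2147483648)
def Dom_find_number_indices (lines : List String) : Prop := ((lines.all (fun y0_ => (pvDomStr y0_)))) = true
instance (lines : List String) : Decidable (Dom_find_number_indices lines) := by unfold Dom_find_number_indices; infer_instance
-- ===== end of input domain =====

-- B changes the algorithm: one slice per row scanned for digit runs and stars, instead of
-- A's per-index branch chain with a lookahead length helper; same cost, more idiomatic.
-- Pre_ excludes exactly the ragged grids on which A raises IndexError.

-- ===== PORT A =====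
-- Python's str.isnumeric is exactly Char.isDigit on the printable-ASCII domain Dom.
-- while-loop of get_number_len; lines[line_index][char_index+1] is in range under Pre_,
-- out of range the Python raises (excluded by Pre_), here a non-digit default stops the loop.
def get_number_len_loop (row : List Char) (W : Int) (char_index : Int) (number_len : Int) : Int :=
  if h : char_index < W - 2 ∧ (PySem.List.pyGetD row (char_index + 1) ' ').isDigit then
    get_number_len_loop row W (char_index + 1) (number_len + 1)
  else
    number_len
termination_by (W - 2 - char_index).toNat
decreasing_by omega

def get_number_len (line_index : Int) (char_index : Int) (lines : List String) : Int :=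
  get_number_len_loop ((PySem.List.pyGetD lines line_index "").toList)
    (((PySem.List.pyGetD lines 0 "").toList.length : Int)) char_index 1

-- body of A's inner j-loop (named so the proofs can speak about it)
def innerBody (lines : List String) (i : Int)
    (acc : List (List Int) × List (List Int)) (j : Int) : List (List Int) × List (List Int) :=
  let row := (PySem.List.pyGetD lines i "").toList
  let c := PySem.List.pyGetD row j ' '
  if c == '*' then (acc.1, acc.2 ++ [[i, j]])
  else if j == 0 && c.isDigit then (acc.1 ++ [[i, j, get_number_len i j lines]], acc.2)
  else if j == 0 then acc
  else if c.isDigit && !(PySem.List.pyGetD row (j - 1) ' ').isDigit then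
    (acc.1 ++ [[i, j, get_number_len i j lines]], acc.2)
  else acc

def find_number_indices (lines : List String) : List (List Int) × List (List Int) :=
  (PySem.List.pyRange 0 (lines.length) 1).foldl
    (fun acc i =>
      (PySem.List.pyRange 0 (((PySem.List.pyGetD lines 0 "").toList.length : Int) - 1) 1).foldl
        (innerBody lines i) acc)
    ([], [])

-- ===== PORT B =====
-- re.finditer(r'[0-9]+', seg): the digit runs of seg as (start, length) pairs
-- fuel (= length of the remaining text) only makes the recursion structural; it never runs out
def digitRunsGo : Nat → List Char → Int → List (Int × Int)
  | 0, _, _ => []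
  | _ + 1, [], _ => []
  | fuel + 1, c :: rest, pos =>
    if c.isDigit then
      let k := (rest.takeWhile Char.isDigit).length
      (pos, (k : Int) + 1) :: digitRunsGo fuel (rest.drop k) (pos + k + 1)
    else digitRunsGo fuel rest (pos + 1)

def digitRuns (cs : List Char) (pos : Int) : List (Int × Int) :=
  digitRunsGo cs.length cs pos

def find_number_indices_alt (lines : List String) : List (List Int) × List (List Int) :=
  match lines with
  | [] => ([], [])
  | first :: _ =>
    let width : Int := max (((first.toList.length : Nat) : Int) - 1) 0
    (PySem.List.enumerate lines 0).foldl
      (fun acc p =>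
        let seg := PySem.List.slice p.2.toList none (some width)
        (acc.1 ++ (digitRuns seg 0).map (fun r => [p.1, r.1, r.2]),
         acc.2 ++ (PySem.List.enumerate seg 0).filterMap
                    (fun q => if q.2 == '*' then some [p.1, q.1] else none)))
      ([], [])

-- ===== PRECONDITION & SPEC =====
-- Pre_ excludes exactly the ragged grids on which A raises IndexError: some row shorter
-- than len(lines[0]) - 1.
def Pre_find_number_indices (lines : List String) : Prop :=
  ∀ s ∈ lines, ((lines.headD "").toList.length : Int) - 1 ≤ (s.toList.length : Int)
instance (lines : List String) : Decidable (Pre_find_number_indices lines) := by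
  unfold Pre_find_number_indices; infer_instance

def pvWitness_find_number_indices : List String := []

def Spec_find_number_indices (lines : List String) (out : List (List Int) × List (List Int)) : Prop := out = find_number_indices_alt lines
instance (lines : List String) (out : List (List Int) × List (List Int)) : Decidable (Spec_find_number_indices lines out) := by unfold Spec_find_number_indices; infer_instance

-- ===== CLAIM (what is proved, stated in full; the proofs are below) =====
def Claim_equal_find_number_indices : Prop := ∀ (lines : List String), Dom_find_number_indices lines → Pre_find_number_indices lines → Spec_find_number_indices lines (find_number_indices lines)

-- ===== LEMMAS AND PROOFS =====

-- length (as Int) of the maximal digit prefix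
def twl (cs : List Char) : Int := ((cs.takeWhile Char.isDigit).length : Int)

-- reference shape of one row's number entries: a char-at-a-time scan carrying
-- "previous char was a digit"
def numsSpec : List Char → Bool → Int → List (Int × Int)
  | [], _, _ => []
  | c :: rest, prev, pos =>
    if c.isDigit && !prev then (pos, twl rest + 1) :: numsSpec rest c.isDigit (pos + 1)
    else numsSpec rest c.isDigit (pos + 1)

-- reference shape of one row's star positions
def starsSpec : List Char → Int → List Int
  | [], _ => []
  | c :: rest, pos =>
    if c == '*' then pos :: starsSpec rest (pos + 1) else starsSpec rest (pos + 1)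

theorem pyGetD_in_range (row : List Char) (a : Int) (h0 : 0 ≤ a) (h1 : a.toNat < row.length) :
    PySem.List.pyGetD row a ' ' = row[a.toNat] := by
  have ha : a = ((a.toNat : Nat) : Int) := by omega
  conv_lhs => rw [ha, PySem.List.pyGetD_natCast]
  simp [List.getD_eq_getElem?_getD, List.getElem?_eq_getElem h1]

theorem pyGetD_out_range (row : List Char) (a : Int) (h0 : 0 ≤ a) (h1 : row.length ≤ a.toNat) :
    PySem.List.pyGetD row a ' ' = ' ' := by
  have ha : a = ((a.toNat : Nat) : Int) := by omega
  conv_lhs => rw [ha, PySem.List.pyGetD_natCast]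
  simp [List.getD_eq_getElem?_getD, List.getElem?_eq_none (by omega : row.length ≤ a.toNat)]

theorem twl_drop_zero (row : List Char) (W ci : Int) (hci : 0 ≤ ci)
    (h : ¬ (ci < W - 2 ∧ (PySem.List.pyGetD row (ci + 1) ' ').isDigit)) :
    twl ((row.take (W - 1).toNat).drop (ci + 1).toNat) = 0 := by
  by_cases hlen : (row.take (W - 1).toNat).length ≤ (ci + 1).toNat
  · rw [List.drop_of_length_le hlen]; rfl
  · rw [not_le] at hlen
    have hslen : (row.take (W - 1).toNat).length = min (W - 1).toNat row.length := by
      simp [List.length_take]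
    have h1 : (ci + 1).toNat < row.length := by omega
    have h2 : ci < W - 2 := by omega
    have hget : PySem.List.pyGetD row (ci + 1) ' ' = row[(ci + 1).toNat] :=
      pyGetD_in_range row (ci + 1) (by omega) h1
    have hnd : (row[(ci + 1).toNat]).isDigit = false := by
      rcases Bool.eq_false_or_eq_true (row[(ci + 1).toNat]).isDigit with hb | hb
      · exact absurd ⟨h2, by rw [hget]; exact hb⟩ h
      · exact hb
    rw [List.drop_eq_getElem_cons hlen]
    unfold twl
    simp [List.getElem_take, hnd]

theorem twl_drop_succ (row : List Char) (W ci : Int) (hci : 0 ≤ ci)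
    (h1 : ci < W - 2) (h2 : (PySem.List.pyGetD row (ci + 1) ' ').isDigit) :
    twl ((row.take (W - 1).toNat).drop (ci + 1).toNat)
      = twl ((row.take (W - 1).toNat).drop (ci + 2).toNat) + 1 := by
  have hrl : (ci + 1).toNat < row.length := by
    by_contra hcon
    rw [pyGetD_out_range row (ci + 1) (by omega) (by omega)] at h2
    simp [Char.isDigit] at h2
  have hget : PySem.List.pyGetD row (ci + 1) ' ' = row[(ci + 1).toNat] :=
    pyGetD_in_range row (ci + 1) (by omega) hrl
  have hlen : (ci + 1).toNat < (row.take (W - 1).toNat).length := by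
    simp [List.length_take]; omega
  rw [List.drop_eq_getElem_cons hlen]
  have hd : (row[(ci + 1).toNat]).isDigit = true := by rw [← hget]; exact h2
  have hidx : (ci + 2).toNat = (ci + 1).toNat + 1 := by omega
  unfold twl
  simp [List.getElem_take, hd, hidx]

theorem gnl_loop_eq (row : List Char) (W : Int) :
    ∀ ci nl : Int, 0 ≤ ci →
      get_number_len_loop row W ci nl
        = nl + twl ((row.take (W - 1).toNat).drop (ci + 1).toNat) := by
  intro ci nl hci
  generalize hm : (W - 2 - ci).toNat = m
  induction m generalizing ci nl with
  | zero =>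
    rw [get_number_len_loop]
    split_ifs with h
    · exact absurd h.1 (by omega)
    · rw [twl_drop_zero row W ci hci h]; ring
  | succ m ih =>
    rw [get_number_len_loop]
    split_ifs with h
    · rw [ih (ci + 1) (nl + 1) (by omega) (by omega),
        twl_drop_succ row W ci hci h.1 h.2]
      have : ci + 1 + 1 = ci + 2 := by ring
      rw [this]; ring
    · rw [twl_drop_zero row W ci hci h]; ring

theorem numsSpec_skip (ds : List Char) :
    (∀ c ∈ ds, c.isDigit = true) →
    ∀ (rest : List Char) (pos : Int),
      numsSpec (ds ++ rest) true pos = numsSpec rest true (pos + ds.length) := by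
  induction ds with
  | nil => intro _ rest pos; simp
  | cons d ds ih =>
    intro hds rest pos
    have hd : d.isDigit = true := hds d (by simp)
    simp only [List.cons_append, numsSpec, hd]
    rw [if_neg (by simp), ih (fun c hc => hds c (by simp [hc])) rest (pos + 1)]
    congr 1
    simp only [List.length_cons]
    push_cast
    ring

theorem numsSpec_prev_irrel (cs : List Char) (pos : Int)
    (h : ∀ c, cs.head? = some c → c.isDigit = false) :
    numsSpec cs true pos = numsSpec cs false pos := by
  cases cs with
  | nil => rfl
  | cons c rest =>
    have hd : c.isDigit = false := h c rfl
    simp [numsSpec, hd]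

theorem digitRunsGo_eq :
    ∀ (fuel : Nat) (cs : List Char) (pos : Int), cs.length ≤ fuel →
      digitRunsGo fuel cs pos = numsSpec cs false pos := by
  intro fuel
  induction fuel with
  | zero =>
    intro cs pos h
    have : cs = [] := List.eq_nil_of_length_eq_zero (by omega)
    subst this; rfl
  | succ fuel ih =>
    intro cs pos h
    cases cs with
    | nil => rfl
    | cons c rest =>
      have hdw : ∀ l : List Char, l.drop (l.takeWhile Char.isDigit).length
          = l.dropWhile Char.isDigit := by
        intro l
        induction l with
        | nil => rfl
        | cons x xs ihx =>
          by_cases hx : x.isDigit <;>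
            simp [hx, ihx]
      by_cases hc : c.isDigit
      · have hlen : (rest.drop (rest.takeWhile Char.isDigit).length).length ≤ fuel := by
          simp at h ⊢; omega
        have hall : ∀ c' ∈ rest.takeWhile Char.isDigit, c'.isDigit = true :=
          fun _ hc' => List.mem_takeWhile_imp hc'
        have hhead : ∀ c', (rest.dropWhile Char.isDigit).head? = some c' → c'.isDigit = false := by
          intro c' h'
          have hh := List.head?_dropWhile_not Char.isDigit rest
          rw [h'] at hh
          exact hh
        have hrec : numsSpec rest true (pos + 1)
            = numsSpec (rest.drop (rest.takeWhile Char.isDigit).length) false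
                (pos + ((rest.takeWhile Char.isDigit).length : Int) + 1) := by
          conv_lhs => rw [← List.takeWhile_append_dropWhile (p := Char.isDigit) (l := rest)]
          rw [numsSpec_skip _ hall, numsSpec_prev_irrel _ _ hhead, hdw rest]
          congr 1
          ring
        simp only [digitRunsGo, numsSpec, hc, Bool.not_false, Bool.and_true, if_true]
        rw [ih _ _ hlen, hrec]
        simp [twl]
      · simp only [Bool.not_eq_true] at hc
        simp only [digitRunsGo, numsSpec, hc]
        simp
        exact ih rest (pos + 1) (by simp at h; omega)

theorem digitRuns_eq (cs : List Char) (pos : Int) :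
    digitRuns cs pos = numsSpec cs false pos :=
  digitRunsGo_eq cs.length cs pos le_rfl

theorem stars_filterMap_eq (i : Int) :
    ∀ (cs : List Char) (s : Int),
      (PySem.List.enumerate cs s).filterMap
          (fun q => if q.2 == '*' then some [i, q.1] else none)
        = (starsSpec cs s).map (fun j => [i, j]) := by
  intro cs
  induction cs with
  | nil => intro s; simp [starsSpec, PySem.List.enumerate]
  | cons c rest ih =>
    intro s
    rw [PySem.List.enumerate_cons, List.filterMap_cons, ih (s + 1)]
    by_cases hc : c = '*' <;> simp [starsSpec, hc]

theorem inner_fold_aux (lines : List String) (i W : Int)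
    (hW : W = ((PySem.List.pyGetD lines 0 "").toList.length : Int))
    (row : List Char) (hrow : row = (PySem.List.pyGetD lines i "").toList)
    (hlen : W - 1 ≤ (row.length : Int)) :
    ∀ (m : Nat) (a : Int), (W - 1 - a).toNat = m → 0 ≤ a →
      ∀ (prev : Bool),
        prev = (decide (a ≠ 0) && (PySem.List.pyGetD row (a - 1) ' ').isDigit) →
      ∀ acc,
      (PySem.List.pyRange a (W - 1) 1).foldl (innerBody lines i) acc
        = (acc.1 ++ (numsSpec ((row.take (W - 1).toNat).drop a.toNat) prev a).map
              (fun r => [i, r.1, r.2]),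
           acc.2 ++ (starsSpec ((row.take (W - 1).toNat).drop a.toNat) a).map
              (fun j => [i, j])) := by
  intro m
  induction m with
  | zero =>
    intro a hm h0 prev hprev acc
    have ha : W - 1 ≤ a := by omega
    rw [PySem.List.pyRange_one_eq_nil ha]
    have hdrop : ((row.take (W - 1).toNat).drop a.toNat) = [] := by
      apply List.drop_of_length_le
      simp [List.length_take]
      omega
    rw [hdrop]
    simp [numsSpec, starsSpec]
  | succ m ih =>
    intro a hm h0 prev hprev acc
    have halt : a < W - 1 := by omega
    rw [PySem.List.pyRange_one_cons halt, List.foldl_cons]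
    have hrowlen : a.toNat < row.length := by omega
    have hseg : a.toNat < ((row.take (W - 1).toNat)).length := by
      simp [List.length_take]; omega
    have hget : PySem.List.pyGetD row a ' ' = row[a.toNat] :=
      pyGetD_in_range row a h0 hrowlen
    have hdropc : (row.take (W - 1).toNat).drop a.toNat
        = row[a.toNat] :: (row.take (W - 1).toNat).drop (a.toNat + 1) := by
      rw [List.drop_eq_getElem_cons hseg]
      congr 1
      simp [List.getElem_take]
    have hnat : (a + 1).toNat = a.toNat + 1 := by omega
    have hprev1 : (row[a.toNat]).isDigit
        = (decide ((a + 1) ≠ 0) && (PySem.List.pyGetD row (a + 1 - 1) ' ').isDigit) := by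
      have h1 : a + 1 - 1 = a := by ring
      rw [h1, hget]
      simp [show a + 1 ≠ 0 by omega]
    have hg : get_number_len i a lines
        = 1 + twl ((row.take (W - 1).toNat).drop (a + 1).toNat) := by
      rw [get_number_len, ← hrow, ← hW]
      exact gnl_loop_eq row W a 1 h0
    by_cases hstar : row[a.toNat] = '*'
    · have hdig : (row[a.toNat]).isDigit = false := by rw [hstar]; decide
      have step : innerBody lines i acc a = (acc.1, acc.2 ++ [[i, a]]) := by
        simp only [innerBody, ← hrow, hget, hstar]
        simp
      rw [step, ih (a + 1) (by omega) (by omega) _ hprev1]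
      rw [hdropc, hnat]
      simp [numsSpec, starsSpec, hstar, hdig, List.append_assoc]
    · by_cases hdig : (row[a.toNat]).isDigit
      · by_cases hp : prev = true
        · -- previous char was a digit: not a run start, nothing appended
          rw [hp] at hprev
          have hand : decide (a ≠ 0) = true ∧ (PySem.List.pyGetD row (a - 1) ' ').isDigit = true := by
            simpa using hprev.symm
          have ha0 : a ≠ 0 := of_decide_eq_true hand.1
          have hpd : (PySem.List.pyGetD row (a - 1) ' ').isDigit = true := hand.2
          have step : innerBody lines i acc a = acc := by
            simp [innerBody, ← hrow, hget, hstar, ha0, hpd, hdig]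
          rw [step, ih (a + 1) (by omega) (by omega) _ hprev1]
          rw [hdropc, hnat]
          simp [numsSpec, starsSpec, hstar, hdig, hp]
        · simp only [Bool.not_eq_true] at hp
          have step : innerBody lines i acc a
              = (acc.1 ++ [[i, a, get_number_len i a lines]], acc.2) := by
            by_cases ha0 : a = 0
            · subst ha0
              simp only [Int.toNat_zero] at hget hstar hdig
              simp [innerBody, ← hrow, hget, hstar, hdig]
            · rw [hp] at hprev
              have hpd : (PySem.List.pyGetD row (a - 1) ' ').isDigit = false := by
                rcases Bool.and_eq_false_iff.mp hprev.symm with h' | h'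
                · exact absurd ha0 (of_decide_eq_false h')
                · exact h'
              simp [innerBody, ← hrow, hget, hstar, ha0, hdig, hpd]
          rw [step, ih (a + 1) (by omega) (by omega) _ hprev1]
          rw [hdropc, hnat]
          simp [numsSpec, starsSpec, hstar, hdig, hp, hg, hnat, List.append_assoc,
            Int.add_comm]
      · simp only [Bool.not_eq_true] at hdig
        have step : innerBody lines i acc a = acc := by
          simp [innerBody, ← hrow, hget, hstar, hdig]
        rw [step, ih (a + 1) (by omega) (by omega) _ hprev1]
        rw [hdropc, hnat]
        simp [numsSpec, starsSpec, hstar, hdig]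

theorem outerA (lines : List String) (W : Int)
    (hW : W = ((PySem.List.pyGetD lines 0 "").toList.length : Int))
    (hpre : ∀ s ∈ lines, W - 1 ≤ (s.toList.length : Int)) :
    ∀ (m a : Nat), lines.length - a = m → a ≤ lines.length → ∀ acc,
      (PySem.List.pyRange (a : Int) (lines.length : Int) 1).foldl
          (fun acc i =>
            (PySem.List.pyRange 0 (W - 1) 1).foldl
              (innerBody lines i) acc) acc
        = (acc.1 ++ (PySem.List.enumerate (lines.drop a) (a : Int)).flatMap
              (fun p => (numsSpec (p.2.toList.take (W - 1).toNat) false 0).map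
                (fun r => [p.1, r.1, r.2])),
           acc.2 ++ (PySem.List.enumerate (lines.drop a) (a : Int)).flatMap
              (fun p => (starsSpec (p.2.toList.take (W - 1).toNat) 0).map
                (fun j => [p.1, j]))) := by
  intro m
  induction m with
  | zero =>
    intro a hm ha acc
    have ha' : a = lines.length := by omega
    rw [PySem.List.pyRange_one_eq_nil (a := (a : Int)) (b := ((lines.length : Nat) : Int))
      (by exact_mod_cast Nat.le_of_eq ha'.symm)]
    rw [List.drop_of_length_le (by omega)]
    simp [PySem.List.enumerate]
  | succ m ih =>
    intro a hm ha acc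
    have ha' : a < lines.length := by omega
    rw [PySem.List.pyRange_one_cons (a := (a : Int)) (b := ((lines.length : Nat) : Int))
      (by exact_mod_cast ha')]
    simp only [List.foldl_cons]
    have hgetl : PySem.List.pyGetD lines (a : Int) "" = lines[a] := by
      rw [PySem.List.pyGetD_natCast]
      simp [List.getD_eq_getElem?_getD, List.getElem?_eq_getElem ha']
    have hrowlen : W - 1 ≤ ((lines[a].toList.length : Nat) : Int) :=
      hpre lines[a] (List.getElem_mem ha')
    have hinner := inner_fold_aux lines (a : Int) W hW (lines[a].toList)
      (by rw [hgetl]) hrowlen (W - 1 - 0).toNat 0 rfl le_rfl false (by simp) acc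
    simp only [Int.toNat_zero, List.drop_zero] at hinner
    rw [hinner]
    have hd : lines.drop a = lines[a] :: lines.drop (a + 1) := List.drop_eq_getElem_cons ha'
    rw [hd, PySem.List.enumerate_cons, List.flatMap_cons, List.flatMap_cons]
    have hcast : (a : Int) + 1 = ((a + 1 : Nat) : Int) := by push_cast; ring
    rw [hcast, ih (a + 1) (by omega) (by omega)]
    simp [List.append_assoc]

theorem outerB (width : Int) :
    ∀ (l : List (Int × String)) (acc : List (List Int) × List (List Int)),
      l.foldl (fun acc p =>
        (acc.1 ++ (digitRuns (PySem.List.slice p.2.toList none (some width)) 0).map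
            (fun r => [p.1, r.1, r.2]),
         acc.2 ++ (PySem.List.enumerate (PySem.List.slice p.2.toList none (some width)) 0).filterMap
            (fun q => if q.2 == '*' then some [p.1, q.1] else none))) acc
      = (acc.1 ++ l.flatMap (fun p =>
            (digitRuns (PySem.List.slice p.2.toList none (some width)) 0).map
              (fun r => [p.1, r.1, r.2])),
         acc.2 ++ l.flatMap (fun p =>
            (PySem.List.enumerate (PySem.List.slice p.2.toList none (some width)) 0).filterMap
              (fun q => if q.2 == '*' then some [p.1, q.1] else none))) := by
  intro l
  induction l with
  | nil => intro acc; simp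
  | cons x xs ih =>
    intro acc
    rw [List.foldl_cons, ih, List.flatMap_cons, List.flatMap_cons]
    simp [List.append_assoc]

theorem find_number_indices_spec' (lines : List String)
    (hpre : Pre_find_number_indices lines) :
    find_number_indices lines = find_number_indices_alt lines := by
  cases lines with
  | nil =>
    simp [find_number_indices, find_number_indices_alt, PySem.List.pyRange_one_eq_nil]
  | cons first rest =>
    have hW : (((first.toList.length : Nat) : Int))
        = ((PySem.List.pyGetD (first :: rest) 0 "").toList.length : Int) := by
      rw [PySem.List.pyGetD_zero_cons]
    have hpre' : ∀ s ∈ (first :: rest), ((first.toList.length : Nat) : Int) - 1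
        ≤ (s.toList.length : Int) := by
      intro s hs
      have := hpre s hs
      simpa using this
    have hA := outerA (first :: rest) ((first.toList.length : Nat) : Int) hW hpre'
      (first :: rest).length 0 (by omega) (by omega) ([], [])
    have hB := outerB (max (((first.toList.length : Nat) : Int) - 1) 0)
      (PySem.List.enumerate (first :: rest) 0) ([], [])
    have hseg : ∀ s : String,
        PySem.List.slice s.toList none (some (max (((first.toList.length : Nat) : Int) - 1) 0))
          = s.toList.take ((((first.toList.length : Nat) : Int)) - 1).toNat := by
      intro s
      rw [PySem.List.slice_to s.toList (le_max_right _ _)]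
      congr 1
      omega
    have hN : (fun p : Int × String =>
          (digitRuns (PySem.List.slice p.2.toList none
              (some (max (((first.toList.length : Nat) : Int) - 1) 0))) 0).map
            (fun r => [p.1, r.1, r.2]))
        = (fun p : Int × String =>
          (numsSpec (p.2.toList.take ((((first.toList.length : Nat) : Int)) - 1).toNat) false 0).map
            (fun r => [p.1, r.1, r.2])) := by
      funext p
      rw [hseg p.2, digitRuns_eq]
    have hS : (fun p : Int × String =>
          (PySem.List.enumerate (PySem.List.slice p.2.toList none
              (some (max (((first.toList.length : Nat) : Int) - 1) 0))) 0).filterMap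
            (fun q => if q.2 == '*' then some [p.1, q.1] else none))
        = (fun p : Int × String =>
          (starsSpec (p.2.toList.take ((((first.toList.length : Nat) : Int)) - 1).toNat) 0).map
            (fun j => [p.1, j])) := by
      funext p
      rw [hseg p.2, stars_filterMap_eq]
    rw [show find_number_indices (first :: rest)
        = (PySem.List.pyRange ((0 : Nat) : Int) (((first :: rest).length : Nat) : Int) 1).foldl
            (fun acc i =>
              (PySem.List.pyRange 0
                  (((PySem.List.pyGetD (first :: rest) 0 "").toList.length : Int) - 1) 1).foldl
                (innerBody (first :: rest) i) acc) ([], []) from rfl]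
    rw [← hW, hA]
    rw [show find_number_indices_alt (first :: rest)
        = (PySem.List.enumerate (first :: rest) 0).foldl (fun acc p =>
            (acc.1 ++ (digitRuns (PySem.List.slice p.2.toList none
                (some (max (((first.toList.length : Nat) : Int) - 1) 0))) 0).map
                (fun r => [p.1, r.1, r.2]),
             acc.2 ++ (PySem.List.enumerate (PySem.List.slice p.2.toList none
                (some (max (((first.toList.length : Nat) : Int) - 1) 0))) 0).filterMap
                (fun q => if q.2 == '*' then some [p.1, q.1] else none))) ([], []) from rfl]
    rw [hB, hN, hS]
    simp

-- ===== VERDICT (by name: the statement is the Claim_ definition above) =====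
theorem find_number_indices_spec : Claim_equal_find_number_indices := by
  intro lines _ hpre
  exact find_number_indices_spec' lines hpre
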